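-- pv_equiv track=rewrite | github.com/ebpfly/shmtools | shm_function_selector/shm_function_selector/handlers.py | _extract_return_info
-- ===== SOURCE A (Python) =====
-- from typing import List, Dict, Any
--
-- def _extract_return_info(docstring: str) -> List[Dict[str, Any]]:
--     """Extract return value information from docstring."""
--     returns = []
--
--     if not docstring:
--         return returns
--
--     lines = docstring.split('\n')
--     in_returns = False
--     current_return = None
--
--     for line in lines:
--         stripped = line.strip()
--
--         # Look for Returns section
--         if stripped.lower() in ['returns', 'returns:', '-------']:
--             in_returns = True
--             continue
--
--         # Stop at next major section
--         if in_returns and stripped.lower() in ['notes', 'notes:', 'examples', 'examples:', 'see also', 'references']: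
--             break
--
--         # Parse return value - check original line for indentation
--         # Indented lines are descriptions, not new variables
--         if in_returns and ':' in stripped and not line.startswith(' ') and not line.startswith('\t'):
--             if current_return:
--                 returns.append(current_return)
--
--             # Parse name and type (format: "name : type")
--             if ' : ' in stripped:
--                 name, type_str = stripped.split(' : ', 1)
--                 current_return = {
--                     'name': name.strip(),
--                     'type': type_str.strip(),
--                     'description': ""
--                 }
--             else:
--                 # Single part, treat as name only
--                 parts = stripped.split(':', 1)
--                 name_part = parts[0].strip()
--                 description = parts[1].strip() if len(parts) > 1 else ""
--                 current_return = {
--                     'name': name_part,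
--                     'type': 'unknown',
--                     'description': description
--                 }
--         elif in_returns and current_return and stripped:
--             # Continuation of description
--             current_return['description'] += ' ' + stripped
--
--     if current_return:
--         returns.append(current_return)
--
--     return returns
-- ===== SOURCE B (Python) =====
-- def _extract_return_info(docstring):
--     """Extract return value information from docstring (two-phase rewrite)."""
--     if not docstring:
--         return []
--     START = {'returns', 'returns:', '-------'}
--     STOP = {'notes', 'notes:', 'examples', 'examples:', 'see also', 'references'}
--     lines = docstring.split('\n')
--
--     # Phase 1: locate the first section header line.
--     start = next((i for i, ln in enumerate(lines)
--                   if ln.strip().lower() in START), None)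
--     if start is None:
--         return []
--
--     # Phase 2: collect the section body up to (excluding) the first stop header.
--     section = []
--     for ln in lines[start + 1:]:
--         if ln.strip().lower() in STOP:
--             break
--         section.append(ln)
--
--     # Phase 3: group the section lines into entries.
--     returns = []
--     current = None
--     for ln in section:
--         s = ln.strip()
--         if s.lower() in START:
--             continue
--         if ':' in s and not ln.startswith((' ', '\t')):
--             if current:
--                 returns.append(current)
--             if ' : ' in s:
--                 name, type_str = s.split(' : ', 1)
--                 current = {'name': name.strip(), 'type': type_str.strip(),
--                            'description': ""}
--             else:
--                 parts = s.split(':', 1)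
--                 current = {'name': parts[0].strip(), 'type': 'unknown',
--                            'description': parts[1].strip() if len(parts) > 1 else ""}
--         elif current and s:
--             current['description'] += ' ' + s
--     if current:
--         returns.append(current)
--     return returns
-- ===== Notes on version B (the rewrite author's own statement) =====
-- stated objective: alternative
-- what changed: A's single stateful loop with an in_returns flag and a break is decomposed into three explicit phases: find the first Returns header index, slice-and-collect the section body up to the first stop header, then fold the collected lines into entries.
import Mathlib
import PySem

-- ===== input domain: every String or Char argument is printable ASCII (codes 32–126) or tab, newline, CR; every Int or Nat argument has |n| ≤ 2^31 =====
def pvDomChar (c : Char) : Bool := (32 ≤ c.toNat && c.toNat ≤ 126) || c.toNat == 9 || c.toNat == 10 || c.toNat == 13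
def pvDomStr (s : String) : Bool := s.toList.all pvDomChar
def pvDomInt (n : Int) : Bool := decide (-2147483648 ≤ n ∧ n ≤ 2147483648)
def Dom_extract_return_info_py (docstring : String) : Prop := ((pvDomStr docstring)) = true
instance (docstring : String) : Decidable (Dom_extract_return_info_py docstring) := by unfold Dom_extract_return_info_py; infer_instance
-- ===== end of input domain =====

-- B re-implements A's single flag-driven loop as three phases (find the section start,
-- collect the section body up to the stop header, group the collected lines into entries);
-- objective: alternative decomposition, same observable result.

-- ===== PORT A =====
-- `stripped.lower() in ['returns', 'returns:', '-------']` (the start-header list)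
def pvIsStart (low : String) : Bool := low == "returns" || low == "returns:" || low == "-------"
-- `stripped.lower() in ['notes', 'notes:', 'examples', 'examples:', 'see also', 'references']`
def pvIsStop (low : String) : Bool :=
  low == "notes" || low == "notes:" || low == "examples" ||
  low == "examples:" || low == "see also" || low == "references"

-- flush of `current_return` into `returns` (the `if current_return: returns.append(...)` step)
def pvFlushA (cur : Option (List (String × String))) (acc : List (List (String × String))) :
    List (List (String × String)) :=
  match cur with
  | some c => acc ++ [c]
  | none => acc

-- the entry dict built in the `':' in stripped` branch (dict literal as assoc list;
-- split(' : ', 1)/split(':', 1) via PySem.Str.splitMax?, whose result is always `some`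
-- with at least one piece since the separator is nonempty)
def pvParseHeaderA (stripped : String) : List (String × String) :=
  if PySem.Str.isIn " : " stripped then
    let parts := (PySem.Str.splitMax? stripped " : " 1).getD []
    [("name", PySem.Str.strip (parts.getD 0 "")),
     ("type", PySem.Str.strip (parts.getD 1 "")),
     ("description", "")]
  else
    let parts := (PySem.Str.splitMax? stripped ":" 1).getD []
    [("name", PySem.Str.strip (parts.getD 0 "")),
     ("type", "unknown"),
     ("description", if parts.length > 1 then PySem.Str.strip (parts.getD 1 "") else "")]

-- `current_return['description'] += ' ' + stripped` (keys of the 3-key dict are distinct,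
-- so updating the value at key "description" in place is exact)
def pvAddDescA (c : List (String × String)) (stripped : String) : List (String × String) :=
  c.map (fun kv => if kv.1 == "description" then (kv.1, kv.2 ++ " " ++ stripped) else kv)

-- the `for line in lines` loop of A, with `break` and the trailing flush folded in
def pvALoop (lines : List String) (inR : Bool) (cur : Option (List (String × String)))
    (acc : List (List (String × String))) : List (List (String × String)) :=
  match lines with
  | [] => pvFlushA cur acc
  | line :: rest =>
    let stripped := PySem.Str.strip line
    if pvIsStart (PySem.Str.lower stripped) then
      pvALoop rest true cur acc
    else if inR && pvIsStop (PySem.Str.lower stripped) then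
      pvFlushA cur acc  -- break, then the final flush
    else if inR && (PySem.Str.isIn ":" stripped &&
            !(PySem.Str.startswith line " ") && !(PySem.Str.startswith line "\t")) then
      pvALoop rest inR (some (pvParseHeaderA stripped)) (pvFlushA cur acc)
    else if inR && (cur.isSome && !(stripped == "")) then
      pvALoop rest inR (cur.map (fun c => pvAddDescA c stripped)) acc
    else
      pvALoop rest inR cur acc

def extract_return_info_py (docstring : String) : List (List (String × String)) :=
  if docstring == "" then []
  else pvALoop ((PySem.Str.split? docstring "\n").getD []) false none []

-- ===== PORT B =====
-- phase-3 step: one line of `section` folded into the (current, returns) state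
def pvBStep (st : Option (List (String × String)) × List (List (String × String)))
    (ln : String) : Option (List (String × String)) × List (List (String × String)) :=
  let s := PySem.Str.strip ln
  if pvIsStart (PySem.Str.lower s) then st
  else if PySem.Str.isIn ":" s &&
          !(PySem.Str.startswith ln " ") && !(PySem.Str.startswith ln "\t") then
    (some (pvParseHeaderA s), pvFlushA st.1 st.2)
  else if st.1.isSome && !(s == "") then
    (st.1.map (fun c => pvAddDescA c s), st.2)
  else st

def extract_return_info_py_alt (docstring : String) : List (List (String × String)) :=
  if docstring == "" then []
  else
    let lines := (PySem.Str.split? docstring "\n").getD []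
    -- phase 1: first index whose stripped, lower-cased line is a START header
    match lines.findIdx? (fun ln => pvIsStart (PySem.Str.lower (PySem.Str.strip ln))) with
    | none => []
    | some i =>
      -- phase 2: the collect-until-STOP-header loop is a takeWhile over the tail
      let sect := (lines.drop (i + 1)).takeWhile
        (fun ln => !pvIsStop (PySem.Str.lower (PySem.Str.strip ln)))
      -- phase 3: group into entries, then flush the last one
      let st := sect.foldl pvBStep (none, [])
      pvFlushA st.1 st.2

-- ===== PRECONDITION & SPEC =====
def Spec_extract_return_info_py (docstring : String) (out : List (List (String × String))) : Prop := out = extract_return_info_py_alt docstring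
instance (docstring : String) (out : List (List (String × String))) : Decidable (Spec_extract_return_info_py docstring out) := by unfold Spec_extract_return_info_py; infer_instance

-- ===== CLAIM (what is proved, stated in full; the proofs are below) =====
def Claim_equal_extract_return_info_py : Prop := ∀ (docstring : String), Dom_extract_return_info_py docstring → Spec_extract_return_info_py docstring (extract_return_info_py docstring)

-- ===== LEMMAS AND PROOFS =====

-- a START header is never a STOP header
theorem pvStart_not_stop (s : String) (h : pvIsStart s = true) : pvIsStop s = false := by
  unfold pvIsStart at h
  rcases Bool.or_eq_true_iff.mp h with h' | h'
  · rcases Bool.or_eq_true_iff.mp h' with h'' | h'' <;>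
      · rw [beq_iff_eq] at h''; subst h''; decide
  · rw [beq_iff_eq] at h'; subst h'; decide

-- phase 1: before the first START header A's loop keeps state (false, none, []) and
-- ends exactly where B's findIdx? points
theorem pvA_phase1 (lines : List String) :
    pvALoop lines false none [] =
      (match lines.findIdx? (fun ln => pvIsStart (PySem.Str.lower (PySem.Str.strip ln))) with
       | none => []
       | some i => pvALoop (lines.drop (i + 1)) true none []) := by
  induction lines with
  | nil => rfl
  | cons line rest ih =>
    rw [List.findIdx?_cons]
    conv_lhs => rw [pvALoop.eq_def]
    by_cases hs : pvIsStart (PySem.Str.lower (PySem.Str.strip line)) = true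
    · simp [hs]
    · simp only [Bool.not_eq_true] at hs
      simp only [hs, Bool.false_eq_true, if_false, Bool.false_and, Option.isSome_none,
        Bool.false_and, Option.map_none]
      rw [ih]
      cases hidx : rest.findIdx? (fun ln => pvIsStart (PySem.Str.lower (PySem.Str.strip ln))) with
      | none => simp
      | some i => simp

-- phase 2+3: once inside the section, A's loop equals B's fold over the
-- takeWhile-collected section body, for any carried state
theorem pvA_phase23 (lines : List String)
    (cur : Option (List (String × String))) (acc : List (List (String × String))) :
    pvALoop lines true cur acc =
      (let st := (lines.takeWhile
          (fun ln => !pvIsStop (PySem.Str.lower (PySem.Str.strip ln)))).foldl pvBStep (cur, acc)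
       pvFlushA st.1 st.2) := by
  induction lines generalizing cur acc with
  | nil => rfl
  | cons line rest ih =>
    simp only [List.takeWhile_cons]
    conv_lhs => rw [pvALoop.eq_def]
    by_cases hstart : pvIsStart (PySem.Str.lower (PySem.Str.strip line)) = true
    · -- a START header inside the section: both sides skip the line
      have hstop := pvStart_not_stop _ hstart
      simp only [hstart, if_true, hstop, Bool.not_false, if_true, List.foldl_cons]
      rw [ih]
      simp [pvBStep, hstart]
    · by_cases hstop : pvIsStop (PySem.Str.lower (PySem.Str.strip line)) = true
      · -- a STOP header: A breaks, B's section ends here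
        simp only [Bool.not_eq_true] at hstart
        simp [hstart, hstop]
      · -- an ordinary line: one step of A is one pvBStep of B
        simp only [Bool.not_eq_true] at hstart hstop
        simp only [hstop, Bool.not_false, if_true, List.foldl_cons, hstart,
          Bool.false_eq_true, if_false, Bool.true_and]
        rw [pvBStep.eq_def]
        simp only [hstart, Bool.false_eq_true, if_false]
        by_cases hc : (PySem.Str.isIn ":" (PySem.Str.strip line) &&
            !(PySem.Str.startswith line " ") && !(PySem.Str.startswith line "\t")) = true
        · simp only [hc, if_true]
          rw [ih]
        · simp only [Bool.not_eq_true] at hc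
          simp only [hc, Bool.false_eq_true, if_false]
          by_cases hd : (cur.isSome && !(PySem.Str.strip line == "")) = true
          · simp only [hd, if_true]
            rw [ih]
          · simp only [Bool.not_eq_true] at hd
            simp only [hd, Bool.false_eq_true, if_false]
            rw [ih]

theorem extract_return_info_py_eq (docstring : String) :
    extract_return_info_py docstring = extract_return_info_py_alt docstring := by
  unfold extract_return_info_py extract_return_info_py_alt
  by_cases h : (docstring == "") = true
  · simp [h]
  · simp only [Bool.not_eq_true] at h
    simp only [h, Bool.false_eq_true, if_false]
    rw [pvA_phase1]
    cases hidx : ((PySem.Str.split? docstring "\n").getD []).findIdx?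
        (fun ln => pvIsStart (PySem.Str.lower (PySem.Str.strip ln))) with
    | none => simp
    | some i => simp only []; exact pvA_phase23 _ _ _

-- ===== VERDICT (by name: the statement is the Claim_ definition above) =====
theorem extract_return_info_py_spec : Claim_equal_extract_return_info_py := by
  intro docstring _
  unfold Spec_extract_return_info_py
  exact extract_return_info_py_eq docstring
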